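-- pv_equiv track=rewrite | github.com/amineseddik/dst | dst.py | dsatur
-- ===== SOURCE A (Python) =====
-- def dsatur(graph):
--     """
--     Algorithme DSATUR pour la coloration de graphe.
--     """
--     colors = {}
--     dsat = {}
--     degree = {node: len(neighbors) for node, neighbors in graph.items()}
--     uncolored = set(graph.keys())
--
--     for node in graph:
--         dsat[node] = 0
--
--     first_vertex = max(graph.keys(), key=lambda x: degree[x])
--     colors[first_vertex] = 1
--     uncolored.remove(first_vertex)
--
--     for neighbor in graph[first_vertex]:
--         if neighbor in uncolored:
--             dsat[neighbor] = len({colors[n] for n in graph[neighbor] if n in colors})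
--
--     while uncolored:
--         next_vertex = max(uncolored, key=lambda x: (dsat[x], degree[x]))
--         used_colors = {colors[neighbor] for neighbor in graph[next_vertex] if neighbor in colors}
--         color = 1
--         while color in used_colors:
--             color += 1
--         colors[next_vertex] = color
--         uncolored.remove(next_vertex)
--         for neighbor in graph[next_vertex]:
--             if neighbor in uncolored:
--                 colored_neighbors = {colors[n] for n in graph[neighbor] if n in colors}
--                 dsat[neighbor] = len(colored_neighbors)
--     return colors
-- ===== SOURCE B (Python) =====
-- def dsatur(graph):
--     """DSATUR with a reverse-adjacency index and incremental per-node color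
--     sets instead of per-step neighborhood rescans."""
--     colors = {}
--     degree = {}
--     rev = {node: [] for node in graph}      # rev[v] = nodes whose list contains v
--     adjc = {node: set() for node in graph}  # colors among colored nodes of graph[node]
--     dsat = {node: 0 for node in graph}
--     for node, neighbors in graph.items():
--         degree[node] = len(neighbors)
--         for nb in neighbors:
--             if nb in rev:
--                 rev[nb].append(node)
--     uncolored = set(graph.keys())
--
--     def assign(v, c):
--         colors[v] = c
--         uncolored.remove(v)
--         for u in rev[v]:
--             adjc[u].add(c)
--         for u in graph[v]:
--             if u in uncolored:
--                 dsat[u] = len(adjc[u])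
--
--     first_vertex = max(graph.keys(), key=lambda x: degree[x])
--     assign(first_vertex, 1)
--     while uncolored:
--         v = max(uncolored, key=lambda x: (dsat[x], degree[x]))
--         used = adjc[v]
--         c = 1
--         while c in used:
--             c += 1
--         assign(v, c)
--     return colors
-- ===== Notes on version B (the rewrite author's own statement) =====
-- stated objective: alternative
-- what changed: B builds a reverse-adjacency index once and maintains an incremental set of adjacent colors per node (updated when a vertex is colored), replacing A's nested per-neighbor neighborhood rescans for dsat and used_colors; the selection scan over the same Python set is unchanged, so the outputs are identical.
import Mathlib
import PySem

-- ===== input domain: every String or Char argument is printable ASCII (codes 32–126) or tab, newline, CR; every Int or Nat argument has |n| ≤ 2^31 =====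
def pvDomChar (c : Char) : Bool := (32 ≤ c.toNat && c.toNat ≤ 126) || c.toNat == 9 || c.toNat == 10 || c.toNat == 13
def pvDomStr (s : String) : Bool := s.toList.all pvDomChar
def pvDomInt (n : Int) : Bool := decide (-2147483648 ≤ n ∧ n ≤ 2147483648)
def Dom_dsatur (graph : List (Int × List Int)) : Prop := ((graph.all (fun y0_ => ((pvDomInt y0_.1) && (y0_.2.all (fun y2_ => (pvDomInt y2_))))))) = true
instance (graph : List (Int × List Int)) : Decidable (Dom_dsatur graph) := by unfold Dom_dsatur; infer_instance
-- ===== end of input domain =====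

-- B replaces A's per-step neighbourhood rescans by a reverse-adjacency index and
-- incrementally maintained per-node colour sets; set/selection history is identical.

-- ---- shared helper: exact model of a CPython set of small ints (hand port of
-- CPython's setobject.c open addressing for int keys; exact for |key| ≤ 2^31 as
-- guaranteed by Dom_dsatur, and for this program's usage pattern, in which every
-- add happens before the first remove, so dummy-slot reuse never occurs).
-- Both Pythons iterate/select over the very same set with the same history, so
-- both ports share this model; the selection scans are NOT where A and B differ.

inductive PvSlot
  | empty
  | dummy
  | act (k : Int)
deriving DecidableEq, Repr

-- hash of an int (exact for |n| < 2^61 - 1)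
def pvHash (n : Int) : Int := if n = -1 then -2 else n

-- CPython probe sequence of slot indices for a given table size (a power of two)
-- and hash: blocks of LINEAR_PROBES(=9)+1 consecutive slots when they fit under
-- the mask, a single slot otherwise; i := i*5 + 1 + (perturb >>= 5) between blocks.
def pvBlock (size i : Nat) : List Nat :=
  if i + 9 ≤ size - 1 then (List.range 10).map (fun d => i + d) else [i]

def pvProbeSeq (size : Nat) : Nat → Nat → Nat → List Nat
  | _, _, 0 => []
  | i, perturb, fuel+1 =>
      pvBlock size i ++
        pvProbeSeq size ((i * 5 + 1 + (perturb >>> 5)) % size) (perturb >>> 5) fuel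

def pvSeq (size : Nat) (h : Int) : List Nat :=
  pvProbeSeq size ((h % (size:Int)).toNat) ((h % (2:Int)^64).toNat) (20 + size)

-- first slot along the probe sequence that is empty or holds k (set_add_entry /
-- set_lookkey stop condition; a dummy or a different key continues the scan)
def pvLook (t : List PvSlot) (k : Int) : Option Nat :=
  (pvSeq t.length (pvHash k)).find?
    (fun j => t.getD j PvSlot.empty = PvSlot.empty || t.getD j PvSlot.empty = PvSlot.act k)

structure PvSet where
  table : List PvSlot
  used : Nat
  fill : Nat
deriving DecidableEq, Repr

-- set_insert_clean: first empty slot along the sequence (used only by resize)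
def pvInsertClean (t : List PvSlot) (k : Int) : List PvSlot :=
  match (pvSeq t.length (pvHash k)).find? (fun j => t.getD j PvSlot.empty = PvSlot.empty) with
  | some j => t.set j (PvSlot.act k)
  | none => t          -- unreachable: the table always keeps an empty slot

def pvNewSizeGo : Nat → Nat → Nat → Nat
  | cur, _, 0 => cur
  | cur, minused, fuel+1 => if cur ≤ minused then pvNewSizeGo (cur * 2) minused fuel else cur

-- set_table_resize: smallest power of two > minused (from PySet_MINSIZE = 8),
-- re-inserting the active keys in table order
def PvSet.resize (s : PvSet) (minused : Nat) : PvSet :=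
  let newsize := pvNewSizeGo 8 minused 64
  let t := s.table.foldl
    (fun t sl => match sl with | PvSlot.act k => pvInsertClean t k | _ => t)
    (List.replicate newsize PvSlot.empty)
  { table := t, used := s.used, fill := s.used }

-- set_add_entry (no dummy reuse: see note above) + growth rule fill*5 ≥ mask*3
def PvSet.add (s : PvSet) (k : Int) : PvSet :=
  match pvLook s.table k with
  | none => s          -- unreachable
  | some j =>
    match s.table.getD j PvSlot.empty with
    | PvSlot.act _ => s
    | _ =>
      let s' : PvSet := { table := s.table.set j (PvSlot.act k), used := s.used + 1, fill := s.fill + 1 }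
      if (s.fill + 1) * 5 ≥ (s.table.length - 1) * 3 then s'.resize (s'.used * 4) else s'

-- set_discard_entry; A only ever removes present keys, so the KeyError branch is dead
def PvSet.remove (s : PvSet) (k : Int) : PvSet :=
  match pvLook s.table k with
  | none => s          -- unreachable
  | some j =>
    match s.table.getD j PvSlot.empty with
    | PvSlot.act _ => { table := s.table.set j PvSlot.dummy, used := s.used - 1, fill := s.fill }
    | _ => s           -- KeyError: not reached by either program

def PvSet.ofKeys (ks : List Int) : PvSet :=
  ks.foldl PvSet.add { table := List.replicate 8 PvSlot.empty, used := 0, fill := 0 }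

-- iteration order: ascending table scan over the active slots
def PvSet.toList (s : PvSet) : List Int :=
  s.table.filterMap (fun sl => match sl with | PvSlot.act k => some k | _ => none)

-- 'x in s': value-equal to a hash lookup (order-independent)
def PvSet.mem (s : PvSet) (k : Int) : Bool := s.toList.contains k

-- shared helper: 'color = 1; while color in used: color += 1' (fuel = len used + 1,
-- enough since used has no duplicates)
def pvMex (used : List Int) : Int → Nat → Int
  | c, 0 => c
  | c, fuel+1 => if used.contains c then pvMex used (c + 1) fuel else c

-- ===== PORT A =====

-- {colors[n] for n in nbrs if n in colors}
def pvScanColors (colors : PySem.Dict Int Int) (nbrs : List Int) : PySem.Set Int :=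
  PySem.Set.ofList (nbrs.filterMap (fun n => colors.get? n))

-- dsat refresh events of A: for nb in graph[v]: if nb in uncolored: dsat[nb] = len({...})
def pvDsatA (graph : PySem.Dict Int (List Int)) (colors : PySem.Dict Int Int)
    (unc : PvSet) (nbrs : List Int) (dsat : PySem.Dict Int Int) : PySem.Dict Int Int :=
  nbrs.foldl
    (fun ds nb =>
      if unc.mem nb then
        ds.insert nb (PySem.Set.len (pvScanColors colors (graph.getD nb [])))
      else ds)
    dsat

def dsaturLoopA (graph : PySem.Dict Int (List Int)) (degree : PySem.Dict Int Int) :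
    Nat → PySem.Dict Int Int → PySem.Dict Int Int → PvSet → PySem.Dict Int Int
  | 0, colors, _, _ => colors
  | fuel+1, colors, dsat, unc =>
    if unc.used = 0 then colors
    else
      match PySem.List.max2? unc.toList (fun x => dsat.getD x 0) (fun x => degree.getD x 0) with
      | none => colors     -- unreachable: used ≠ 0
      | some v =>
        let usedC := pvScanColors colors (graph.getD v [])
        let c := pvMex usedC 1 (usedC.length + 1)
        let colors' := colors.insert v c
        let unc' := unc.remove v
        let dsat' := pvDsatA graph colors' unc' (graph.getD v []) dsat
        dsaturLoopA graph degree fuel colors' dsat' unc'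

def dsatur (graph : List (Int × List Int)) : List (Int × Int) :=
  let gd : PySem.Dict Int (List Int) := PySem.Dict.mk graph
  let degree : PySem.Dict Int Int :=
    graph.foldl (fun d p => d.insert p.1 ((p.2.length : Int))) PySem.Dict.empty
  let uncolored := PvSet.ofKeys (PySem.Dict.keys gd)
  let dsat : PySem.Dict Int Int :=
    (PySem.Dict.keys gd).foldl (fun d n => d.insert n 0) PySem.Dict.empty
  match PySem.List.max? (PySem.Dict.keys gd) (fun x => degree.getD x 0) with
  | none => []             -- max() on an empty dict raises ValueError: excluded by Pre_
  | some fv =>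
    let colors := (PySem.Dict.empty : PySem.Dict Int Int).insert fv 1
    let uncolored := uncolored.remove fv
    let dsat := pvDsatA gd colors uncolored (gd.getD fv []) dsat
    (dsaturLoopA gd degree graph.length colors dsat uncolored).items

-- ===== PORT B =====

-- rev = {node: [] for node in graph}; then rev[nb].append(node) for nb in graph[node] if nb in rev
def pvRev (graph : List (Int × List Int)) : PySem.Dict Int (List Int) :=
  graph.foldl
    (fun rv p =>
      p.2.foldl
        (fun rv nb => if rv.contains nb then rv.modify nb [] (fun l => l ++ [p.1]) else rv)
        rv)
    (graph.foldl (fun d p => d.insert p.1 []) PySem.Dict.empty)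

-- assign(v, c): record the colour, drop v from the set, push c into the colour set
-- of every node whose list contains v, then run A's dsat refresh events off those sets
def pvAssign (graph rev : PySem.Dict Int (List Int))
    (colors dsat : PySem.Dict Int Int) (adjc : PySem.Dict Int (List Int)) (unc : PvSet)
    (v : Int) (c : Int) :
    PySem.Dict Int Int × PySem.Dict Int Int × PySem.Dict Int (List Int) × PvSet :=
  let colors' := colors.insert v c
  let unc' := unc.remove v
  let adjc' := (rev.getD v []).foldl
    (fun ac u => ac.modify u [] (fun s => PySem.Set.add s c)) adjc
  let dsat' := (graph.getD v []).foldl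
    (fun ds u => if unc'.mem u then ds.insert u (PySem.Set.len (adjc'.getD u [])) else ds)
    dsat
  (colors', dsat', adjc', unc')

def dsaturLoopB (graph rev : PySem.Dict Int (List Int)) (degree : PySem.Dict Int Int) :
    Nat → PySem.Dict Int Int → PySem.Dict Int Int → PySem.Dict Int (List Int) → PvSet →
      PySem.Dict Int Int
  | 0, colors, _, _, _ => colors
  | fuel+1, colors, dsat, adjc, unc =>
    if unc.used = 0 then colors
    else
      match PySem.List.max2? unc.toList (fun x => dsat.getD x 0) (fun x => degree.getD x 0) with
      | none => colors     -- unreachable: used ≠ 0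
      | some v =>
        let usedC := adjc.getD v []
        let c := pvMex usedC 1 (usedC.length + 1)
        let st := pvAssign graph rev colors dsat adjc unc v c
        dsaturLoopB graph rev degree fuel st.1 st.2.1 st.2.2.1 st.2.2.2

def dsatur_alt (graph : List (Int × List Int)) : List (Int × Int) :=
  let gd : PySem.Dict Int (List Int) := PySem.Dict.mk graph
  let degree : PySem.Dict Int Int :=
    graph.foldl (fun d p => d.insert p.1 ((p.2.length : Int))) PySem.Dict.empty
  let rev := pvRev graph
  let adjc : PySem.Dict Int (List Int) :=
    graph.foldl (fun d p => d.insert p.1 []) PySem.Dict.empty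
  let dsat : PySem.Dict Int Int :=
    graph.foldl (fun d p => d.insert p.1 0) PySem.Dict.empty
  let uncolored := PvSet.ofKeys (PySem.Dict.keys gd)
  match PySem.List.max? (PySem.Dict.keys gd) (fun x => degree.getD x 0) with
  | none => []             -- max() on an empty dict raises ValueError: excluded by Pre_
  | some fv =>
    let st := pvAssign gd rev PySem.Dict.empty dsat adjc uncolored fv 1
    (dsaturLoopB gd rev degree graph.length st.1 st.2.1 st.2.2.1 st.2.2.2).items

-- ===== PRECONDITION & SPEC =====
-- Pre_ excludes the empty dict (A's max(graph.keys()) raises ValueError) and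
-- association lists with duplicate keys, which do not represent a Python dict.
def Pre_dsatur (graph : List (Int × List Int)) : Prop :=
  graph ≠ [] ∧ (graph.map Prod.fst).Nodup
instance (graph : List (Int × List Int)) : Decidable (Pre_dsatur graph) := by
  unfold Pre_dsatur; infer_instance

def pvWitness_dsatur : (List (Int × List Int)) := [(1, [2, 3]), (2, [1]), (3, [1])]

def Spec_dsatur (graph : List (Int × List Int)) (out : List (Int × Int)) : Prop := out = dsatur_alt graph
instance (graph : List (Int × List Int)) (out : List (Int × Int)) : Decidable (Spec_dsatur graph out) := by unfold Spec_dsatur; infer_instance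

-- ===== CLAIM (what is proved, stated in full; the proofs are below) =====
def Claim_equal_dsatur : Prop := ∀ (graph : List (Int × List Int)), Dom_dsatur graph → Pre_dsatur graph → Spec_dsatur graph (dsatur graph)

-- ===== LEMMAS AND PROOFS =====

-- ---- generic find? stability along a fixed probe sequence ----

theorem pvFind?_mono {seq : List Nat} {q q' : Nat → Bool} {j : Nat}
    (h : seq.find? q = some j) (h1 : ∀ i, q i = false → q' i = false) (h2 : q' j = true) :
    seq.find? q' = some j := by
  induction seq with
  | nil => simp at h
  | cons a rest ih =>
    by_cases ha : q a = true
    · simp [ha] at h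
      subst h
      simp [h2]
    · have ha' : q a = false := by simpa using ha
      have := h1 a ha'
      simp [ha', this] at h ⊢
      exact ih h

-- ---- the table well-formedness invariant: a hash lookup finds exactly the slot ----

def pvWFt (t : List PvSlot) : Prop :=
  ∀ k j, j < t.length → t.getD j PvSlot.empty = PvSlot.act k → pvLook t k = some j

theorem pvGetD_out (t : List PvSlot) (j : Nat) (h : ¬ j < t.length) :
    t.getD j PvSlot.empty = PvSlot.empty := by
  have : t[j]? = none := List.getElem?_eq_none (by omega)
  simp [List.getD_eq_getElem?_getD, this]

theorem pvAct_getD (t : List PvSlot) (k : Int) :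
    PvSlot.act k ∈ t ↔ ∃ j, j < t.length ∧ t.getD j PvSlot.empty = PvSlot.act k := by
  constructor
  · intro h
    rcases List.getElem_of_mem h with ⟨j, hj, hg⟩
    exact ⟨j, hj, by simp [List.getD_eq_getElem?_getD, List.getElem?_eq_getElem hj, hg]⟩
  · rintro ⟨j, hj, hg⟩
    have : t[j]? = some (PvSlot.act k) := by
      rcases List.getElem?_eq_some_iff.2 ⟨hj, rfl⟩ with h'
      simp [List.getD_eq_getElem?_getD, h'] at hg
      simp [h', hg]
    exact List.mem_of_getElem? this

theorem pvMem_toList (s : PvSet) (k : Int) :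
    k ∈ s.toList ↔ PvSlot.act k ∈ s.table := by
  unfold PvSet.toList
  rw [List.mem_filterMap]
  constructor
  · rintro ⟨sl, hsl, hf⟩
    cases sl <;> simp_all
  · intro h; exact ⟨PvSlot.act k, h, rfl⟩

theorem pvGetD_set (t : List PvSlot) (j i : Nat) (x : PvSlot) :
    (t.set j x).getD i PvSlot.empty =
      if i = j ∧ j < t.length then x else t.getD i PvSlot.empty := by
  simp only [List.getD_eq_getElem?_getD, List.getElem?_set]
  by_cases hij : i = j
  · subst hij
    by_cases hlen : i < t.length
    · simp [hlen]
    · have hn : t[i]? = none := List.getElem?_eq_none (by omega)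
      simp [hlen, hn]
  · have : ¬ j = i := fun h => hij h.symm
    simp [hij, this]

-- look stops only at an empty slot or at k's slot
theorem pvLook_stop {t : List PvSlot} {k : Int} {j : Nat} (h : pvLook t k = some j) :
    t.getD j PvSlot.empty = PvSlot.empty ∨ t.getD j PvSlot.empty = PvSlot.act k := by
  have := List.find?_some h
  simp at this
  tauto

theorem pvLook_def (t : List PvSlot) (k : Int) :
    pvLook t k = (pvSeq t.length (pvHash k)).find?
      (fun j => t.getD j PvSlot.empty = PvSlot.empty || t.getD j PvSlot.empty = PvSlot.act k) := rfl

-- a present key's slot is found by its own lookup (reformulation of pvWFt)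
theorem pvWFt_present {t : List PvSlot} (hwf : pvWFt t) {k : Int}
    (h : PvSlot.act k ∈ t) :
    ∃ j, pvLook t k = some j ∧ t.getD j PvSlot.empty = PvSlot.act k := by
  rcases (pvAct_getD t k).1 h with ⟨j, hj, hg⟩
  exact ⟨j, hwf k j hj hg, hg⟩

theorem pvLen_lt_of_act {t : List PvSlot} {k : Int} {j : Nat}
    (h : t.getD j PvSlot.empty = PvSlot.act k) : j < t.length := by
  by_contra hc
  rw [pvGetD_out t j hc] at h
  exact PvSlot.noConfusion h

-- WF: a remove really removes (and removes only) k
theorem pvRemove_not_mem {s : PvSet} (hwf : pvWFt s.table) (k : Int) :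
    k ∉ (s.remove k).toList := by
  intro hmem
  unfold PvSet.remove at hmem
  cases hlook : pvLook s.table k with
  | none =>
    simp only [hlook] at hmem
    rcases pvWFt_present hwf ((pvMem_toList _ _).1 hmem) with ⟨j, hj, _⟩
    simp [hlook] at hj
  | some j =>
    simp only [hlook] at hmem
    cases hslot : s.table.getD j PvSlot.empty with
    | act m =>
      rcases pvLook_stop hlook with h' | h' <;> rw [hslot] at h'
      · exact PvSlot.noConfusion h'
      · cases h'
        simp only [hslot] at hmem
        have hact := (pvMem_toList _ _).1 hmem
        rcases (pvAct_getD _ k).1 hact with ⟨j', hj', hg'⟩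
        rw [List.length_set] at hj'
        rw [pvGetD_set] at hg'
        by_cases hjj : j' = j ∧ j < s.table.length
        · rw [if_pos hjj] at hg'; exact PvSlot.noConfusion hg'
        · rw [if_neg hjj] at hg'
          have := hwf k j' hj' hg'
          rw [hlook] at this
          have hjlen : j < s.table.length := pvLen_lt_of_act hslot
          exact hjj ⟨by injection this with h; exact h.symm, hjlen⟩
    | empty =>
      simp only [hslot] at hmem
      rcases pvWFt_present hwf ((pvMem_toList _ _).1 hmem) with ⟨j', hj', hg'⟩
      rw [hlook] at hj'
      injection hj' with hj'
      rw [← hj', hslot] at hg'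
      exact PvSlot.noConfusion hg'
    | dummy =>
      rcases pvLook_stop hlook with h' | h' <;> rw [hslot] at h' <;> exact PvSlot.noConfusion h'

theorem pvRemove_subset (s : PvSet) (k : Int) :
    ∀ x, x ∈ (s.remove k).toList → x ∈ s.toList := by
  intro x hx
  unfold PvSet.remove at hx
  cases hlook : pvLook s.table k with
  | none => simp only [hlook] at hx; exact hx
  | some j =>
    simp only [hlook] at hx
    cases hslot : s.table.getD j PvSlot.empty with
    | act m =>
      simp only [hslot] at hx
      have hact := (pvMem_toList _ _).1 hx
      rcases List.mem_or_eq_of_mem_set hact with h | h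
      · exact (pvMem_toList _ _).2 h
      · exact PvSlot.noConfusion h
    | empty => simp only [hslot] at hx; exact hx
    | dummy => simp only [hslot] at hx; exact hx

theorem pvWFt_remove {s : PvSet} (hwf : pvWFt s.table) (k : Int) :
    pvWFt (s.remove k).table := by
  unfold PvSet.remove
  cases hlook : pvLook s.table k with
  | none => simp only [hlook]; exact hwf
  | some j =>
    simp only [hlook]
    cases hslot : s.table.getD j PvSlot.empty with
    | empty => simp only [hslot]; exact hwf
    | dummy => simp only [hslot]; exact hwf
    | act m =>
      simp only [hslot]
      rcases pvLook_stop hlook with h' | h' <;> rw [hslot] at h'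
      · exact PvSlot.noConfusion h'
      cases h'
      -- the removed key k sat at slot j; its slot becomes a dummy
      intro m' j' hlen' hg'
      rw [List.length_set] at hlen'
      rw [pvGetD_set] at hg'
      have hjlen : j < s.table.length := pvLen_lt_of_act hslot
      by_cases hjj : j' = j ∧ j < s.table.length
      · rw [if_pos hjj] at hg'; exact (PvSlot.noConfusion hg')
      · rw [if_neg hjj] at hg'
        have hj'j : j' ≠ j := by
          intro h; exact hjj ⟨h, hjlen⟩
        have hlook' := hwf m' j' hlen' hg'
        have hmk : m' ≠ k := by
          intro h
          rw [h] at hlook'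
          rw [hlook] at hlook'
          exact hj'j (by injection hlook' with h; exact h.symm)
        rw [pvLook_def, List.length_set]
        rw [pvLook_def] at hlook'
        refine pvFind?_mono hlook' ?_ ?_
        · intro i hfalse
          rw [pvGetD_set]
          by_cases hij : i = j ∧ j < s.table.length
          · rw [if_pos hij]; simp
          · rw [if_neg hij]; exact hfalse
        · rw [pvGetD_set, if_neg (by intro h; exact hjj h)]
          simp [← List.getD_eq_getElem?_getD, hg']

-- every probe index is inside the table
theorem pvProbeSeq_lt (size : Nat) (hpos : 0 < size) :
    ∀ (fuel i perturb : Nat), i < size → ∀ j ∈ pvProbeSeq size i perturb fuel, j < size := by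
  intro fuel
  induction fuel with
  | zero => intro i perturb _ j hj; simp [pvProbeSeq] at hj
  | succ f ih =>
    intro i perturb hi j hj
    rw [pvProbeSeq, List.mem_append] at hj
    rcases hj with hj | hj
    · unfold pvBlock at hj
      split_ifs at hj with hblk
      · rcases List.mem_map.1 hj with ⟨d, hd, rfl⟩
        have : d < 10 := List.mem_range.1 hd
        omega
      · rcases List.mem_singleton.1 hj with rfl; exact hi
    · exact ih _ _ (Nat.mod_lt _ hpos) j hj

theorem pvLook_lt {t : List PvSlot} {k : Int} {j : Nat} (hpos : 0 < t.length)
    (h : pvLook t k = some j) : j < t.length := by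
  have hmem := List.mem_of_find?_eq_some (pvLook_def t k ▸ h)
  unfold pvSeq at hmem
  refine pvProbeSeq_lt t.length hpos _ _ _ ?_ j hmem
  have h0 : (0:Int) < (t.length : Int) := by exact_mod_cast hpos
  have h1 := Int.emod_lt_of_pos (pvHash k) h0
  have h2 : 0 ≤ pvHash k % (t.length:Int) := Int.emod_nonneg (pvHash k) (by omega)
  omega

-- a WF table holds no duplicated active key
theorem pvWFt_not_dup {t : List PvSlot} (hwf : pvWFt t) (k : Int) :
    ¬ List.Duplicate (PvSlot.act k) t := by
  intro hdup
  rcases List.sublist_eq_map_getElem (List.duplicate_iff_sublist.1 hdup) with ⟨is, his, hmono⟩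
  match is, his, hmono with
  | [], his, _ => simp at his
  | [_], his, _ => simp at his
  | (_ :: _ :: _ :: _), his, _ =>
    have := congrArg List.length his
    simp at this
  | [i1, i2], his, hmono =>
    have hlt : (i1 : Nat) < (i2 : Nat) := by
      have := (List.pairwise_cons.1 hmono).1 i2 (by simp)
      exact this
    simp only [List.map_cons, List.map_nil, List.cons.injEq, and_true] at his
    rcases his with ⟨h1, h2⟩
    have g1 : t.getD (i1 : Nat) PvSlot.empty = PvSlot.act k := by
      rw [List.getD_eq_getElem?_getD, List.getElem?_eq_getElem i1.isLt]
      exact congrArg (Option.getD · PvSlot.empty) (congrArg some h1.symm)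
    have g2 : t.getD (i2 : Nat) PvSlot.empty = PvSlot.act k := by
      rw [List.getD_eq_getElem?_getD, List.getElem?_eq_getElem i2.isLt]
      exact congrArg (Option.getD · PvSlot.empty) (congrArg some h2.symm)
    have e1 := hwf k i1 i1.isLt g1
    have e2 := hwf k i2 i2.isLt g2
    rw [e1] at e2
    injection e2 with e
    omega

-- inserting an absent key into an empty slot found by a probe preserves WF;
-- hfind may be either the lookup probe (add) or the empty-slot probe (resize)
theorem pvWFt_insertAt {t : List PvSlot} (hwf : pvWFt t) {k : Int} {j : Nat}
    (hpos : 0 < t.length)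
    (hjlen : j < t.length)
    (hempty : t.getD j PvSlot.empty = PvSlot.empty)
    (habs : PvSlot.act k ∉ t)
    (hfind : pvLook (t.set j (PvSlot.act k)) k = some j) :
    pvWFt (t.set j (PvSlot.act k)) := by
  intro m j' hlen' hg'
  rw [List.length_set] at hlen'
  rw [pvGetD_set] at hg'
  by_cases hjj : j' = j ∧ j < t.length
  · rw [if_pos hjj] at hg'
    injection hg' with hg'
    subst hg'
    rw [hjj.1]
    exact hfind
  · rw [if_neg hjj] at hg'
    have hj'j : j' ≠ j := fun h => hjj ⟨h, hjlen⟩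
    by_cases hmk : m = k
    · subst hmk
      exact absurd ((pvAct_getD t m).2 ⟨j', hlen', hg'⟩) habs
    · have hlook' := hwf m j' hlen' hg'
      rw [pvLook_def, List.length_set]
      rw [pvLook_def] at hlook'
      refine pvFind?_mono hlook' ?_ ?_
      · intro i hfalse
        rw [pvGetD_set]
        by_cases hij : i = j ∧ j < t.length
        · exfalso
          rcases hij with ⟨rfl, _⟩
          rw [hempty] at hfalse
          simp at hfalse
        · rw [if_neg hij]; exact hfalse
      · rw [pvGetD_set, if_neg (fun h => hjj h)]
        simp [← List.getD_eq_getElem?_getD, hg']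

-- the looked-up slot for k after the insert is j itself
theorem pvLook_set_self {t : List PvSlot} {k : Int} {j : Nat}
    (hjlen : j < t.length)
    (hstop : pvLook t k = some j ∨
      (pvSeq t.length (pvHash k)).find?
        (fun i => t.getD i PvSlot.empty = PvSlot.empty) = some j)
    (habs : PvSlot.act k ∉ t) :
    pvLook (t.set j (PvSlot.act k)) k = some j := by
  rw [pvLook_def, List.length_set]
  have h2 : ((t.set j (PvSlot.act k)).getD j PvSlot.empty = PvSlot.empty ∨
      (t.set j (PvSlot.act k)).getD j PvSlot.empty = PvSlot.act k) := by
    rw [pvGetD_set, if_pos ⟨rfl, hjlen⟩]; right; rfl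
  rcases hstop with h | h
  · rw [pvLook_def] at h
    refine pvFind?_mono h ?_ (by simpa using h2)
    intro i hfalse
    rw [pvGetD_set]
    by_cases hij : i = j ∧ j < t.length
    · exfalso
      rcases hij with ⟨rfl, _⟩
      have := List.find?_some h
      simp only at this hfalse
      rw [hfalse] at this
      exact Bool.noConfusion this
    · rw [if_neg hij]; exact hfalse
  · refine pvFind?_mono h ?_ (by simpa using h2)
    intro i hfalse
    rw [pvGetD_set]
    by_cases hij : i = j ∧ j < t.length
    · exfalso
      rcases hij with ⟨rfl, _⟩
      have := List.find?_some h
      simp only at this hfalse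
      rw [hfalse] at this
      exact Bool.noConfusion this
    · rw [if_neg hij]
      simp only [Bool.or_eq_false_iff, decide_eq_false_iff_not]
      refine ⟨by simpa using hfalse, fun hik => ?_⟩
      exact habs ((pvAct_getD t k).2 ⟨i, pvLen_lt_of_act hik, hik⟩)

theorem pvSeq_mem_lt {size j : Nat} {h : Int} (hpos : 0 < size) (hj : j ∈ pvSeq size h) :
    j < size := by
  unfold pvSeq at hj
  refine pvProbeSeq_lt size hpos _ _ _ ?_ j hj
  have h0 : (0:Int) < (size : Int) := by exact_mod_cast hpos
  have h1 := Int.emod_lt_of_pos h h0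
  have h2 : 0 ≤ h % (size:Int) := Int.emod_nonneg h (by omega)
  omega

theorem pvGetD_replicate (n j : Nat) :
    (List.replicate n PvSlot.empty).getD j PvSlot.empty = PvSlot.empty := by
  rw [List.getD_eq_getElem?_getD, List.getElem?_replicate]
  split_ifs <;> rfl

theorem pvNewSizeGo_ge : ∀ (fuel cur m : Nat), cur ≤ pvNewSizeGo cur m fuel := by
  intro fuel
  induction fuel with
  | zero => intro cur m; exact Nat.le_refl _
  | succ f ih =>
    intro cur m
    rw [pvNewSizeGo]
    split_ifs
    · exact Nat.le_trans (by omega) (ih (cur * 2) m)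
    · exact Nat.le_refl _

-- the resize/re-insertion fold keeps the table well formed
theorem pvCleanFold :
    ∀ (rem acc seen : List PvSlot),
      pvWFt acc → 0 < acc.length →
      (∀ m, PvSlot.act m ∈ acc → PvSlot.act m ∈ seen) →
      (∀ m, PvSlot.act m ∈ seen → PvSlot.act m ∉ rem) →
      (∀ m, ¬ List.Duplicate (PvSlot.act m) rem) →
      pvWFt (rem.foldl (fun t sl =>
          match sl with | PvSlot.act k => pvInsertClean t k | _ => t) acc) ∧
      0 < (rem.foldl (fun t sl =>
          match sl with | PvSlot.act k => pvInsertClean t k | _ => t) acc).length ∧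
      (∀ m, PvSlot.act m ∈ rem.foldl (fun t sl =>
          match sl with | PvSlot.act k => pvInsertClean t k | _ => t) acc →
        PvSlot.act m ∈ seen ∨ PvSlot.act m ∈ rem) := by
  intro rem
  induction rem with
  | nil =>
    intro acc seen hwf hpos hseen _ _
    exact ⟨hwf, hpos, fun m hm => Or.inl (hseen m hm)⟩
  | cons sl rem' ih =>
    intro acc seen hwf hpos hseen hdisj hdup
    cases sl with
    | empty =>
      rcases ih acc seen hwf hpos hseen
        (fun m hm => fun hr => hdisj m hm (List.mem_cons_of_mem _ hr))
        (fun m hd => hdup m (hd.duplicate_cons _)) with ⟨h1, h2, h3⟩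
      exact ⟨h1, h2, fun m hm => (h3 m hm).imp id (List.mem_cons_of_mem _)⟩
    | dummy =>
      rcases ih acc seen hwf hpos hseen
        (fun m hm => fun hr => hdisj m hm (List.mem_cons_of_mem _ hr))
        (fun m hd => hdup m (hd.duplicate_cons _)) with ⟨h1, h2, h3⟩
      exact ⟨h1, h2, fun m hm => (h3 m hm).imp id (List.mem_cons_of_mem _)⟩
    | act k =>
      have hknotacc : PvSlot.act k ∉ acc :=
        fun h => hdisj k (hseen k h) (List.mem_cons_self)
      have hknotrem : PvSlot.act k ∉ rem' :=
        fun h => hdup k (List.Mem.duplicate_cons_self h)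
      simp only [List.foldl_cons]
      unfold pvInsertClean
      cases hf : (pvSeq acc.length (pvHash k)).find?
          (fun j => acc.getD j PvSlot.empty = PvSlot.empty) with
      | none =>
        rcases ih acc (seen ++ [PvSlot.act k]) hwf hpos
          (fun m hm => List.mem_append_left _ (hseen m hm))
          (fun m hm => by
            rcases List.mem_append.1 hm with h | h
            · exact fun hr => hdisj m h (List.mem_cons_of_mem _ hr)
            · rcases List.mem_singleton.1 h with h
              rw [h]; exact hknotrem)
          (fun m hd => hdup m (hd.duplicate_cons _)) with ⟨h1, h2, h3⟩
        refine ⟨h1, h2, fun m hm => ?_⟩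
        rcases h3 m hm with h | h
        · rcases List.mem_append.1 h with h | h
          · exact Or.inl h
          · rcases List.mem_singleton.1 h with h
            exact Or.inr (h ▸ List.mem_cons_self)
        · exact Or.inr (List.mem_cons_of_mem _ h)
      | some j =>
        have hempty : acc.getD j PvSlot.empty = PvSlot.empty := by
          have := List.find?_some hf
          simpa using this
        have hjlen : j < acc.length :=
          pvSeq_mem_lt hpos (List.mem_of_find?_eq_some hf)
        have hfind := pvLook_set_self hjlen (Or.inr hf) hknotacc
        have hwf' := pvWFt_insertAt hwf hpos hjlen hempty hknotacc hfind
        rcases ih (acc.set j (PvSlot.act k)) (seen ++ [PvSlot.act k]) hwf'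
          (by rw [List.length_set]; exact hpos)
          (fun m hm => by
            rcases List.mem_or_eq_of_mem_set hm with h | h
            · exact List.mem_append_left _ (hseen m h)
            · rw [h]; exact List.mem_append_right _ List.mem_cons_self)
          (fun m hm => by
            rcases List.mem_append.1 hm with h | h
            · exact fun hr => hdisj m h (List.mem_cons_of_mem _ hr)
            · rcases List.mem_singleton.1 h with h
              rw [h]; exact hknotrem)
          (fun m hd => hdup m (hd.duplicate_cons _)) with ⟨h1, h2, h3⟩
        refine ⟨h1, h2, fun m hm => ?_⟩
        rcases h3 m hm with h | h
        · rcases List.mem_append.1 h with h | h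
          · exact Or.inl h
          · rcases List.mem_singleton.1 h with h
            exact Or.inr (h ▸ List.mem_cons_self)
        · exact Or.inr (List.mem_cons_of_mem _ h)

theorem pvResize_WF {s : PvSet} (hwf : pvWFt s.table) (minused : Nat) :
    pvWFt (s.resize minused).table ∧ 0 < (s.resize minused).table.length ∧
    (∀ m, PvSlot.act m ∈ (s.resize minused).table → PvSlot.act m ∈ s.table) := by
  have hinit : pvWFt (List.replicate (pvNewSizeGo 8 minused 64) PvSlot.empty) := by
    intro m j hlen hg
    rw [pvGetD_replicate] at hg
    exact absurd hg (by simp)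
  have hpos : 0 < (List.replicate (pvNewSizeGo 8 minused 64) PvSlot.empty).length := by
    rw [List.length_replicate]
    exact Nat.lt_of_lt_of_le (by omega) (pvNewSizeGo_ge 64 8 minused)
  rcases pvCleanFold s.table (List.replicate (pvNewSizeGo 8 minused 64) PvSlot.empty) []
    hinit hpos
    (fun m hm => absurd (List.eq_of_mem_replicate hm) (by simp))
    (fun m hm => absurd hm (List.not_mem_nil))
    (fun m => pvWFt_not_dup hwf m) with ⟨h1, h2, h3⟩
  refine ⟨h1, h2, fun m hm => ?_⟩
  rcases h3 m hm with h | h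
  · exact absurd h List.not_mem_nil
  · exact h

theorem pvAdd_WF {s : PvSet} (hwf : pvWFt s.table) (hpos : 0 < s.table.length) (k : Int) :
    pvWFt (s.add k).table ∧ 0 < (s.add k).table.length ∧
    (∀ m, PvSlot.act m ∈ (s.add k).table → PvSlot.act m ∈ s.table ∨ m = k) := by
  unfold PvSet.add
  cases hlook : pvLook s.table k with
  | none => exact ⟨hwf, hpos, fun m hm => Or.inl hm⟩
  | some j =>
    simp only [hlook]
    cases hslot : s.table.getD j PvSlot.empty with
    | act m' => exact ⟨hwf, hpos, fun m hm => Or.inl hm⟩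
    | dummy =>
      rcases pvLook_stop hlook with h | h <;> rw [hslot] at h <;> exact PvSlot.noConfusion h
    | empty =>
      simp only [hslot]
      have habs : PvSlot.act k ∉ s.table := by
        intro h
        rcases pvWFt_present hwf h with ⟨j', hj', hg'⟩
        rw [hlook] at hj'
        injection hj' with hj'
        rw [← hj', hslot] at hg'
        exact PvSlot.noConfusion hg'
      have hjlen : j < s.table.length := pvLook_lt hpos hlook
      have hfind := pvLook_set_self hjlen (Or.inl hlook) habs
      have hwf' := pvWFt_insertAt hwf hpos hjlen hslot habs hfind
      have hmem' : ∀ m, PvSlot.act m ∈ s.table.set j (PvSlot.act k) →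
          PvSlot.act m ∈ s.table ∨ m = k := by
        intro m hm
        rcases List.mem_or_eq_of_mem_set hm with h | h
        · exact Or.inl h
        · injection h with h; exact Or.inr h
      split_ifs
      · rcases pvResize_WF (s := ⟨s.table.set j (PvSlot.act k), s.used + 1, s.fill + 1⟩)
          hwf' _ with ⟨h1, h2, h3⟩
        exact ⟨h1, h2, fun m hm => hmem' m (h3 m hm)⟩
      · exact ⟨hwf', by rw [List.length_set]; exact hpos, hmem'⟩

theorem pvOfKeys_aux (ks : List Int) :
    ∀ (s : PvSet), pvWFt s.table → 0 < s.table.length →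
      pvWFt (ks.foldl PvSet.add s).table ∧ 0 < (ks.foldl PvSet.add s).table.length ∧
      (∀ m, PvSlot.act m ∈ (ks.foldl PvSet.add s).table → PvSlot.act m ∈ s.table ∨ m ∈ ks) := by
  induction ks with
  | nil => intro s hwf hpos; exact ⟨hwf, hpos, fun m hm => Or.inl hm⟩
  | cons a ks' ih =>
    intro s hwf hpos
    rcases pvAdd_WF hwf hpos a with ⟨h1, h2, h3⟩
    rcases ih (s.add a) h1 h2 with ⟨g1, g2, g3⟩
    refine ⟨g1, g2, fun m hm => ?_⟩
    rcases g3 m hm with h | h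
    · rcases h3 m h with h' | h'
      · exact Or.inl h'
      · exact Or.inr (h' ▸ List.mem_cons_self)
    · exact Or.inr (List.mem_cons_of_mem _ h)

theorem pvInit_WF : pvWFt (List.replicate 8 PvSlot.empty) ∧
    0 < (List.replicate 8 PvSlot.empty : List PvSlot).length := by
  constructor
  · intro m j hlen hg
    rw [pvGetD_replicate] at hg
    exact absurd hg (by simp)
  · simp

theorem pvWFt_ofKeys (ks : List Int) : pvWFt (PvSet.ofKeys ks).table := by
  unfold PvSet.ofKeys
  exact (pvOfKeys_aux ks _ pvInit_WF.1 pvInit_WF.2).1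

theorem pvOfKeys_subset (ks : List Int) :
    ∀ x, x ∈ (PvSet.ofKeys ks).toList → x ∈ ks := by
  intro x hx
  have hact := (pvMem_toList _ x).1 hx
  unfold PvSet.ofKeys at hact
  rcases (pvOfKeys_aux ks _ pvInit_WF.1 pvInit_WF.2).2.2 x hact with h | h
  · exact absurd (List.eq_of_mem_replicate h) (by simp)
  · exact h

-- ---- small helpers about sets and mex ----

theorem pvMex_congr {l1 l2 : List Int} (h : ∀ x, x ∈ l1 ↔ x ∈ l2) :
    ∀ c fuel, pvMex l1 c fuel = pvMex l2 c fuel := by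
  intro c fuel
  induction fuel generalizing c with
  | zero => rfl
  | succ f ih =>
    have hc : l1.contains c = l2.contains c := by
      simp [h c]
    rw [pvMex, pvMex, hc]
    split_ifs
    · exact ih (c + 1)
    · rfl

theorem pvLen_eq {l1 l2 : List Int} (h1 : l1.Nodup) (h2 : l2.Nodup)
    (h : ∀ x, x ∈ l1 ↔ x ∈ l2) : l1.length = l2.length := by
  exact List.Perm.length_eq ((List.perm_ext_iff_of_nodup h1 h2).2 h)

theorem pvFoldlOptMem {f : Option Int → Int → Option Int}
    (hf : ∀ acc x, f acc x = some x ∨ f acc x = acc) :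
    ∀ (xs : List Int) (acc : Option Int) (m : Int),
      xs.foldl f acc = some m → acc = some m ∨ m ∈ xs := by
  intro xs
  induction xs with
  | nil => intro acc m h; exact Or.inl h
  | cons a t ih =>
    intro acc m h
    rw [List.foldl_cons] at h
    rcases ih _ m h with h' | h'
    · rcases hf acc a with hh | hh
      · rw [hh] at h'
        injection h' with h'
        exact Or.inr (h' ▸ List.mem_cons_self)
      · rw [hh] at h'
        exact Or.inl h'
    · exact Or.inr (List.mem_cons_of_mem _ h')

theorem pvMax2?_mem {xs : List Int} {k1 k2 : Int → Int} {m : Int}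
    (h : PySem.List.max2? xs k1 k2 = some m) : m ∈ xs := by
  unfold PySem.List.max2? at h
  have hres := pvFoldlOptMem ?hf xs none m h
  case hf =>
    intro acc x
    cases acc with
    | none => exact Or.inl rfl
    | some m0 =>
      simp only
      split_ifs
      · exact Or.inl rfl
      · exact Or.inr rfl
  rcases hres with h' | h'
  · simp at h'
  · exact h'

-- ---- characterisation of the fold that pushes colour c to every list in rev[v] ----

theorem pvFoldModifyAdd (c : Int) :
    ∀ (L : List Int) (ac : PySem.Dict Int (List Int)) (u : Int),
      ((L.foldl (fun ac w => ac.modify w [] (fun s => PySem.Set.add s c)) ac).getD u []) =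
        if u ∈ L then PySem.Set.add (ac.getD u []) c else ac.getD u [] := by
  intro L
  induction L with
  | nil => intro ac u; simp
  | cons w L' ih =>
    intro ac u
    rw [List.foldl_cons, ih]
    rw [PySem.Dict.getD_modify]
    by_cases huw : u = w
    · subst huw
      by_cases hul : u ∈ L'
      · simp [hul]
      · simp [hul]
    · by_cases hul : u ∈ L'
      · simp [hul, huw, List.mem_cons]
      · simp [hul, huw, List.mem_cons]

-- ---- rev characterisation ----

-- a fold of empty-list inserts leaves every getD at []
theorem pvInitGetD (l : List (Int × List Int)) :
    ∀ (d : PySem.Dict Int (List Int)), (∀ w, d.getD w ([] : List Int) = []) →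
      ∀ w, (l.foldl (fun d p => d.insert p.1 ([] : List Int)) d).getD w [] = [] := by
  induction l with
  | nil => intro d hd w; exact hd w
  | cons p l' ih =>
    intro d hd w
    rw [List.foldl_cons]
    refine ih _ (fun w' => ?_) w
    rw [PySem.Dict.getD_insert]
    split_ifs
    · rfl
    · exact hd w'

theorem pvRevInit_contains (graph : List (Int × List Int)) (w : Int) :
    (graph.foldl (fun d p => d.insert p.1 ([] : List Int)) PySem.Dict.empty).contains w =
      decide (w ∈ graph.map Prod.fst) := by
  rw [PySem.Dict.contains_eq_decide_mem_keys]
  have := PySem.Dict.keys_foldl_insert_key graph Prod.fst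
    (fun _ _ => ([] : List Int)) PySem.Dict.empty
  rw [this]
  congr 1
  simp only [eq_iff_iff]
  rw [PySem.Dict.keys_empty, PySem.Set.update_nil_left, PySem.Set.mem_ofList]

-- the inner loop of pvRev: appends a once to rev[nb] for each nb in N ∩ keys
theorem pvRevInner (K : List Int) (a : Int) :
    ∀ (N : List Int) (rv : PySem.Dict Int (List Int)),
      (∀ w, rv.contains w = decide (w ∈ K)) →
      (∀ w, (N.foldl (fun rv nb =>
          if rv.contains nb then rv.modify nb [] (fun l => l ++ [a]) else rv) rv).contains w =
        decide (w ∈ K)) ∧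
      ∀ v, v ∈ K → ∀ u,
        (u ∈ (N.foldl (fun rv nb =>
            if rv.contains nb then rv.modify nb [] (fun l => l ++ [a]) else rv) rv).getD v [] ↔
          (u ∈ rv.getD v [] ∨ (v ∈ N ∧ u = a))) := by
  intro N
  induction N with
  | nil =>
    intro rv hcont
    exact ⟨hcont, fun v _ u => by simp⟩
  | cons nb N' ih =>
    intro rv hcont
    rw [List.foldl_cons]
    by_cases hnb : nb ∈ K
    · rw [if_pos (by rw [hcont]; simpa)]
      have hcont' : ∀ w, (rv.modify nb [] (fun l => l ++ [a])).contains w = decide (w ∈ K) := by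
        intro w
        rw [PySem.Dict.contains_modify, hcont]
        by_cases hw : w = nb
        · subst hw; simp [hnb]
        · simp [hw]
      rcases ih _ hcont' with ⟨h1, h2⟩
      refine ⟨h1, fun v hvK u => ?_⟩
      rw [h2 v hvK u, PySem.Dict.getD_modify]
      by_cases hvnb : v = nb
      · subst hvnb
        simp [List.mem_append]
        tauto
      · simp [hvnb, List.mem_cons]
        try tauto
    · rw [if_neg (by rw [hcont]; simpa)]
      rcases ih _ hcont with ⟨h1, h2⟩
      refine ⟨h1, fun v hvK u => ?_⟩
      rw [h2 v hvK u]
      have : ¬ v = nb := fun h => hnb (h ▸ hvK)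
      simp [List.mem_cons, this]

-- the outer loop of pvRev
theorem pvRevOuter (K : List Int) :
    ∀ (l : List (Int × List Int)) (rv : PySem.Dict Int (List Int)),
      (∀ w, rv.contains w = decide (w ∈ K)) →
      ∀ v, v ∈ K → ∀ u,
        (u ∈ (l.foldl (fun rv p => p.2.foldl (fun rv nb =>
            if rv.contains nb then rv.modify nb [] (fun l => l ++ [p.1]) else rv) rv) rv).getD v [] ↔
          (u ∈ rv.getD v [] ∨ ∃ p ∈ l, p.1 = u ∧ v ∈ p.2)) := by
  intro l
  induction l with
  | nil => intro rv _ v _ u; simp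
  | cons p l' ih =>
    intro rv hcont v hvK u
    rw [List.foldl_cons]
    rcases pvRevInner K p.1 p.2 rv hcont with ⟨h1, h2⟩
    rw [ih _ h1 v hvK u, h2 v hvK u]
    constructor
    · rintro ((h | ⟨hv2, rfl⟩) | ⟨q, hq, rfl, hvq⟩)
      · exact Or.inl h
      · exact Or.inr ⟨p, List.mem_cons_self, rfl, hv2⟩
      · exact Or.inr ⟨q, List.mem_cons_of_mem _ hq, rfl, hvq⟩
    · rintro (h | ⟨q, hq, rfl, hvq⟩)
      · exact Or.inl (Or.inl h)
      · rcases List.mem_cons.1 hq with rfl | hq'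
        · exact Or.inl (Or.inr ⟨hvq, rfl⟩)
        · exact Or.inr ⟨q, hq', rfl, hvq⟩

theorem pvRev_spec (graph : List (Int × List Int)) (hnd : (graph.map Prod.fst).Nodup)
    (v : Int) (hv : v ∈ graph.map Prod.fst) (u : Int) :
    u ∈ (pvRev graph).getD v [] ↔ v ∈ (PySem.Dict.mk graph).getD u [] := by
  unfold pvRev
  rw [pvRevOuter (graph.map Prod.fst) graph _ (pvRevInit_contains graph) v hv u]
  rw [pvInitGetD graph PySem.Dict.empty (fun w => by rw [PySem.Dict.getD_empty])]
  simp only [List.not_mem_nil, false_or]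
  constructor
  · rintro ⟨p, hp, rfl, hvp⟩
    have hget : (PySem.Dict.mk graph).get? p.1 = some p.2 :=
      PySem.Dict.get?_of_mem_items (PySem.Dict.mk graph) (by exact hp) hnd
    rw [PySem.Dict.getD_eq_get?_getD, hget]
    exact hvp
  · intro hvg
    rw [PySem.Dict.getD_eq_get?_getD] at hvg
    cases hget : (PySem.Dict.mk graph).get? u with
    | none => rw [hget] at hvg; simp at hvg
    | some L =>
      rw [hget] at hvg
      exact ⟨(u, L), PySem.Dict.mem_items_of_get?_eq_some _ hget, rfl, hvg⟩

-- ---- the joint loop invariant ----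

def pvInv (gd : PySem.Dict Int (List Int)) (colors : PySem.Dict Int Int)
    (adjc : PySem.Dict Int (List Int)) (unc : PvSet) : Prop :=
  (∀ u ∈ unc.toList, colors.get? u = none) ∧
  pvWFt unc.table ∧
  (∀ u, (adjc.getD u []).Nodup) ∧
  (∀ u x, x ∈ adjc.getD u [] ↔ ∃ n ∈ gd.getD u [], colors.get? n = some x) ∧
  (∀ u ∈ unc.toList, u ∈ gd.keys)

-- membership in A's rescanned colour set
theorem pvScan_mem (colors : PySem.Dict Int Int) (L : List Int) (x : Int) :
    x ∈ pvScanColors colors L ↔ ∃ n ∈ L, colors.get? n = some x := by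
  unfold pvScanColors
  rw [PySem.Set.mem_ofList, List.mem_filterMap]

-- one assignment step: B's pvAssign equals A's rescan-based update, and the
-- invariant survives
theorem pvAssign_step (graph : List (Int × List Int)) (hnd : (graph.map Prod.fst).Nodup)
    (colors dsat : PySem.Dict Int Int) (adjc : PySem.Dict Int (List Int)) (unc : PvSet)
    (v c : Int) (hinv : pvInv (PySem.Dict.mk graph) colors adjc unc)
    (hvnone : colors.get? v = none) (hvK : v ∈ (PySem.Dict.mk graph).keys) :
    (pvAssign (PySem.Dict.mk graph) (pvRev graph) colors dsat adjc unc v c).2.1 =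
      pvDsatA (PySem.Dict.mk graph) (colors.insert v c) (unc.remove v)
        ((PySem.Dict.mk graph).getD v []) dsat ∧
    pvInv (PySem.Dict.mk graph) (colors.insert v c)
      (pvAssign (PySem.Dict.mk graph) (pvRev graph) colors dsat adjc unc v c).2.2.1
      (unc.remove v) := by
  rcases hinv with ⟨h1, h2, h3, h4, h5⟩
  have hKeq : (PySem.Dict.mk graph).keys = graph.map Prod.fst := rfl
  set gd := PySem.Dict.mk graph with hgd
  set adjc' := ((pvRev graph).getD v []).foldl
    (fun ac u => ac.modify u [] (fun s => PySem.Set.add s c)) adjc with hadjc'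
  -- the new colour-insert lookups
  have hins : ∀ n, (colors.insert v c).get? n = if n = v then some c else colors.get? n :=
    fun n => PySem.Dict.get?_insert colors v n c
  -- membership in the new incremental sets = membership in the new rescans
  have hmemnew : ∀ u x, x ∈ adjc'.getD u [] ↔
      ∃ n ∈ gd.getD u [], (colors.insert v c).get? n = some x := by
    intro u x
    rw [hadjc', pvFoldModifyAdd]
    have hrev := pvRev_spec graph hnd v (hKeq ▸ hvK) u
    constructor
    · intro hx
      split_ifs at hx with hurev
      · rcases (PySem.Set.mem_add _ c x).1 hx with hx | rfl
        · rcases (h4 u x).1 hx with ⟨n, hn, hcn⟩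
          refine ⟨n, hn, ?_⟩
          rw [hins n, if_neg ?_]
          · exact hcn
          · rintro rfl; rw [hvnone] at hcn; simp at hcn
        · exact ⟨v, hrev.1 hurev, by rw [hins v, if_pos rfl]⟩
      · rcases (h4 u x).1 hx with ⟨n, hn, hcn⟩
        refine ⟨n, hn, ?_⟩
        rw [hins n, if_neg ?_]
        · exact hcn
        · rintro rfl; rw [hvnone] at hcn; simp at hcn
    · rintro ⟨n, hn, hcn⟩
      rw [hins n] at hcn
      split_ifs with hurev
      · rw [PySem.Set.mem_add]
        by_cases hnv : n = v
        · rw [if_pos hnv] at hcn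
          injection hcn with hcn
          exact Or.inr hcn.symm
        · rw [if_neg hnv] at hcn
          exact Or.inl ((h4 u x).2 ⟨n, hn, hcn⟩)
      · by_cases hnv : n = v
        · subst hnv
          exact absurd (hrev.2 hn) hurev
        · rw [if_neg hnv] at hcn
          exact (h4 u x).2 ⟨n, hn, hcn⟩
  have hnodup' : ∀ u, (adjc'.getD u []).Nodup := by
    intro u
    rw [hadjc', pvFoldModifyAdd]
    split_ifs
    · exact PySem.Set.nodup_add _ c (h3 u)
    · exact h3 u
  constructor
  · -- the two dsat folds compute the same dictionary
    show ((gd.getD v []).foldl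
        (fun ds w => if (unc.remove v).mem w then
            ds.insert w (PySem.Set.len (adjc'.getD w [])) else ds) dsat) = _
    unfold pvDsatA
    congr 1
    funext ds u
    congr 1
    have : PySem.Set.len (adjc'.getD u []) =
        PySem.Set.len (pvScanColors (colors.insert v c) (gd.getD u [])) := by
      unfold PySem.Set.len
      congr 1
      refine pvLen_eq (hnodup' u) (PySem.Set.nodup_ofList _) ?_
      intro x
      rw [hmemnew u x, pvScan_mem]
    rw [this]
  · refine ⟨?_, pvWFt_remove h2 v, hnodup', hmemnew, ?_⟩
    · intro u hu
      have hu' := pvRemove_subset unc v u hu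
      have hune : u ≠ v := by
        intro he
        rw [he] at hu
        exact pvRemove_not_mem h2 v hu
      rw [hins u, if_neg hune]
      exact h1 u hu'
    · intro u hu
      exact h5 u (pvRemove_subset unc v u hu)

-- the two loops agree under the invariant
theorem pvLoop_eq (graph : List (Int × List Int)) (hnd : (graph.map Prod.fst).Nodup)
    (degree : PySem.Dict Int Int) :
    ∀ (fuel : Nat) (colors dsat : PySem.Dict Int Int) (adjc : PySem.Dict Int (List Int))
      (unc : PvSet), pvInv (PySem.Dict.mk graph) colors adjc unc →
      dsaturLoopA (PySem.Dict.mk graph) degree fuel colors dsat unc =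
        dsaturLoopB (PySem.Dict.mk graph) (pvRev graph) degree fuel colors dsat adjc unc := by
  intro fuel
  induction fuel with
  | zero => intro colors dsat adjc unc _; rfl
  | succ f ih =>
    intro colors dsat adjc unc hinv
    rw [dsaturLoopA, dsaturLoopB]
    by_cases hused : unc.used = 0
    · rw [if_pos hused, if_pos hused]
    · rw [if_neg hused, if_neg hused]
      cases hmax : PySem.List.max2? unc.toList (fun x => dsat.getD x 0)
          (fun x => degree.getD x 0) with
      | none => rfl
      | some v =>
        have hv := pvMax2?_mem hmax
        obtain ⟨h1, h2, h3, h4, h5⟩ := hinv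
        have hmemiff : ∀ x, x ∈ pvScanColors colors ((PySem.Dict.mk graph).getD v []) ↔
            x ∈ adjc.getD v [] := by
          intro x
          rw [pvScan_mem, h4 v x]
        have hlen : (pvScanColors colors ((PySem.Dict.mk graph).getD v [])).length =
            (adjc.getD v []).length :=
          pvLen_eq (PySem.Set.nodup_ofList _) (h3 v) hmemiff
        have hc : pvMex (pvScanColors colors ((PySem.Dict.mk graph).getD v [])) 1
              ((pvScanColors colors ((PySem.Dict.mk graph).getD v [])).length + 1) =
            pvMex (adjc.getD v []) 1 ((adjc.getD v []).length + 1) := by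
          rw [hlen]
          exact pvMex_congr hmemiff 1 _
        simp only
        rw [← hc]
        have hstep := pvAssign_step graph hnd colors dsat adjc unc v
          (pvMex (pvScanColors colors ((PySem.Dict.mk graph).getD v [])) 1
            ((pvScanColors colors ((PySem.Dict.mk graph).getD v [])).length + 1))
          ⟨h1, h2, h3, h4, h5⟩ (h1 v hv) (h5 v hv)
        rw [hstep.1.symm]
        exact ih _ _ _ _ hstep.2

-- the two initial dsat dictionaries are the same fold
theorem pvDsat0_eq (graph : List (Int × List Int)) :
    (PySem.Dict.keys (PySem.Dict.mk graph)).foldl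
        (fun d n => d.insert n (0 : Int)) PySem.Dict.empty =
      graph.foldl (fun d p => d.insert p.1 (0 : Int)) PySem.Dict.empty := by
  show (graph.map Prod.fst).foldl (fun d n => d.insert n (0 : Int)) PySem.Dict.empty = _
  rw [List.foldl_map]

-- the invariant at the start
theorem pvInv_init (graph : List (Int × List Int)) :
    pvInv (PySem.Dict.mk graph) PySem.Dict.empty
      (graph.foldl (fun d p => d.insert p.1 ([] : List Int)) PySem.Dict.empty)
      (PvSet.ofKeys (PySem.Dict.keys (PySem.Dict.mk graph))) := by
  refine ⟨fun u _ => PySem.Dict.get?_empty u, pvWFt_ofKeys _, ?_, ?_, ?_⟩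
  · intro u
    rw [pvInitGetD graph PySem.Dict.empty (fun w => PySem.Dict.getD_empty w []) u]
    exact List.nodup_nil
  · intro u x
    rw [pvInitGetD graph PySem.Dict.empty (fun w => PySem.Dict.getD_empty w []) u]
    simp [PySem.Dict.get?_empty]
  · intro u hu
    exact pvOfKeys_subset _ u hu

-- ===== VERDICT (by name: the statement is the Claim_ definition above) =====
theorem dsatur_spec : Claim_equal_dsatur := by
  unfold Claim_equal_dsatur
  intro graph _ hpre
  unfold Spec_dsatur
  rcases hpre with ⟨hne, hnd⟩
  unfold dsatur dsatur_alt
  simp only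
  cases hmax : PySem.List.max? (PySem.Dict.keys (PySem.Dict.mk graph))
      (fun x => (graph.foldl (fun d p => d.insert p.1 ((p.2.length : Int)))
        PySem.Dict.empty).getD x 0) with
  | none => rfl
  | some fv =>
    simp only
    have hfvK : fv ∈ (PySem.Dict.mk graph).keys := PySem.List.max?_mem hmax
    have hstep := pvAssign_step graph hnd PySem.Dict.empty
      (graph.foldl (fun d p => d.insert p.1 (0 : Int)) PySem.Dict.empty)
      (graph.foldl (fun d p => d.insert p.1 ([] : List Int)) PySem.Dict.empty)
      (PvSet.ofKeys (PySem.Dict.keys (PySem.Dict.mk graph))) fv 1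
      (pvInv_init graph) (PySem.Dict.get?_empty fv) hfvK
    have hA1 : (pvAssign (PySem.Dict.mk graph) (pvRev graph) PySem.Dict.empty
        (graph.foldl (fun d p => d.insert p.1 (0 : Int)) PySem.Dict.empty)
        (graph.foldl (fun d p => d.insert p.1 ([] : List Int)) PySem.Dict.empty)
        (PvSet.ofKeys (PySem.Dict.keys (PySem.Dict.mk graph))) fv 1).1 =
        PySem.Dict.empty.insert fv 1 := rfl
    have hA4 : (pvAssign (PySem.Dict.mk graph) (pvRev graph) PySem.Dict.empty
        (graph.foldl (fun d p => d.insert p.1 (0 : Int)) PySem.Dict.empty)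
        (graph.foldl (fun d p => d.insert p.1 ([] : List Int)) PySem.Dict.empty)
        (PvSet.ofKeys (PySem.Dict.keys (PySem.Dict.mk graph))) fv 1).2.2.2 =
        (PvSet.ofKeys (PySem.Dict.keys (PySem.Dict.mk graph))).remove fv := rfl
    rw [hA1, hA4, hstep.1, pvDsat0_eq]
    exact congrArg PySem.Dict.items
      (pvLoop_eq graph hnd _ graph.length _ _ _ _ hstep.2)
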